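-- pv_equiv track=rewrite | github.com/iveL91/Advent-of-Code-2019 | libs/aoc_06_lib.py | orbit_counter
-- ===== SOURCE A (Python) =====
-- from typing import List
--
-- def orbit_counter(orbits: List[List[str]], obj: str, counter: int) -> int:
--     """"""
--     if obj != "COM":
--         for orbit in orbits:
--             if obj == orbit[1]:
--                 obj = orbit[0]
--                 counter += 1
--                 counter = orbit_counter(orbits, obj, counter)
--                 break
--     return counter
-- ===== SOURCE B (Python) =====
-- def orbit_counter(orbits, obj, counter):
--     # Build the child -> parent map once (reversed so the FIRST row wins, like A's
--     # first-match scan), collect the ancestor chain of obj as a list, return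
--     # counter plus the chain's length.
--     parent = {orbit[1]: orbit[0] for orbit in reversed(orbits)}
--     chain = []
--     while obj != "COM" and obj in parent:
--         chain.append(obj)
--         obj = parent[obj]
--     return counter + len(chain)
-- ===== Notes on version B (the rewrite author's own statement) =====
-- stated objective: alternative
-- what changed: B builds a child->parent dictionary once (reversed so the first row wins) and collects the ancestor chain of obj as a list, returning counter plus the chain length, instead of A's recursion that rescans the whole orbit list at every level.
-- outside the precondition, e.g. on orbit_counter([['COM', 'B'], ['X']], 'B', 0): A returns 1, B raises IndexError
import Mathlib
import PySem

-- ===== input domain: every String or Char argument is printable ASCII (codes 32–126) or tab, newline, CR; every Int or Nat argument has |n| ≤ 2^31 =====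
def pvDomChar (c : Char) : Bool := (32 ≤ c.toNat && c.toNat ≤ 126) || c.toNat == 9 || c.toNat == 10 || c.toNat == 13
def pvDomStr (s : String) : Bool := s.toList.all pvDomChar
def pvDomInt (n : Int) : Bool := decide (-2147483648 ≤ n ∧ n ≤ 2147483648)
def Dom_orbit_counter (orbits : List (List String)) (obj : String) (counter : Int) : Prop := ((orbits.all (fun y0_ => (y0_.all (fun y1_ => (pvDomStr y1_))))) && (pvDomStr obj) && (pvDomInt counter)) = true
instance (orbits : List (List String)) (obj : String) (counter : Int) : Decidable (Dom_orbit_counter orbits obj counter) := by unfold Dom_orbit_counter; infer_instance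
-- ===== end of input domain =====

-- B replaces A's recursion (which rescans the whole orbit list at every level) by a dictionary
-- built once from the reversed list plus an ancestor-chain list whose length is added to the
-- counter (objective: alternative).  Python A raises IndexError on rows shorter than 2 and
-- RecursionError on parent cycles reachable from obj; those inputs are outside Pre_.

-- ===== PORT A =====
-- the for-loop with break: first row whose element 1 equals obj
def orbitScanA (obj : String) : List (List String) → Option (List String)
  | [] => none
  | orbit :: rest => if obj = orbit.getD 1 "" then some orbit else orbitScanA obj rest

-- fuel only makes the recursion total; inside Pre_ it never runs out
def orbit_counter_go (orbits : List (List String)) : Nat → String → Int → Int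
  | 0, _, counter => counter
  | fuel + 1, obj, counter =>
    if obj ≠ "COM" then
      match orbitScanA obj orbits with
      | some orbit => orbit_counter_go orbits fuel (orbit.getD 0 "") (counter + 1)
      | none => counter
    else counter

def orbit_counter (orbits : List (List String)) (obj : String) (counter : Int) : Int :=
  orbit_counter_go orbits (orbits.length + 1) obj counter

-- ===== PORT B =====
-- parent = {orbit[1]: orbit[0] for orbit in reversed(orbits)}
def orbitParentB (orbits : List (List String)) : PySem.Dict String String :=
  orbits.reverse.foldl (fun d orbit => d.insert (orbit.getD 1 "") (orbit.getD 0 "")) PySem.Dict.empty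

-- the while loop collecting the ancestor chain of obj, made total with fuel
def orbitChainB (parent : PySem.Dict String String) : Nat → String → List String
  | 0, _ => []
  | fuel + 1, obj =>
    if obj = "COM" then []
    else
      match parent.get? obj with
      | none => []
      | some nxt => obj :: orbitChainB parent fuel nxt

def orbit_counter_alt (orbits : List (List String)) (obj : String) (counter : Int) : Int :=
  counter + (orbitChainB (orbitParentB orbits) (orbits.length + 1) obj).length

-- ===== PRECONDITION & SPEC =====
-- first parent of c in the input graph and one climbing step (used only by Pre_)
def pvParent (orbits : List (List String)) (c : String) : Option String :=
  (orbits.find? (fun o => o.getD 1 "" == c)).map (fun o => o.getD 0 "")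

def pvClimb (orbits : List (List String)) (s : Option String) : Option String :=
  s.bind (fun c => if c = "COM" then none else pvParent orbits c)

-- Pre_ excludes inputs where Python A raises: a row with fewer than 2 entries scanned before a
-- match (IndexError) or a parent cycle reachable from obj (RecursionError).  It says: every row
-- has at least 2 entries, and the parent chain from obj dies out (reaches "COM" or a parentless
-- object) within orbits.length + 1 steps — which, the chain being deterministic, is exactly
-- "no cycle reachable from obj".  Requiring ALL rows to have ≥ 2 entries is slightly narrower
-- than A's scan needs (a short row lying after the matched one is never touched by A but is
-- read by B's dictionary build, which raises there).
def Pre_orbit_counter (orbits : List (List String)) (obj : String) (counter : Int) : Prop :=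
  (∀ row ∈ orbits, 2 ≤ row.length) ∧ (pvClimb orbits)^[orbits.length + 1] (some obj) = none
instance (orbits : List (List String)) (obj : String) (counter : Int) : Decidable (Pre_orbit_counter orbits obj counter) := by unfold Pre_orbit_counter; infer_instance

def pvWitness_orbit_counter : List (List String) × String × Int :=
  ([["COM", "A"], ["A", "B"]], "B", 0)

def Spec_orbit_counter (orbits : List (List String)) (obj : String) (counter : Int) (out : Int) : Prop := out = orbit_counter_alt orbits obj counter
instance (orbits : List (List String)) (obj : String) (counter : Int) (out : Int) : Decidable (Spec_orbit_counter orbits obj counter out) := by unfold Spec_orbit_counter; infer_instance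

-- ===== CLAIM (what is proved, stated in full; the proofs are below) =====
def Claim_equal_orbit_counter : Prop := ∀ (orbits : List (List String)) (obj : String) (counter : Int), Dom_orbit_counter orbits obj counter → Pre_orbit_counter orbits obj counter → Spec_orbit_counter orbits obj counter (orbit_counter orbits obj counter)

-- ===== LEMMAS AND PROOFS =====

-- the reversed overwrite build realises the first-match scan
theorem orbitParentB_get? (orbits : List (List String)) (c : String) :
    (orbitParentB orbits).get? c = (orbitScanA c orbits).map (fun orbit => orbit.getD 0 "") := by
  induction orbits with
  | nil => simp [orbitParentB, orbitScanA, PySem.Dict.get?_empty]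
  | cons orbit rest ih =>
    have hfold : orbitParentB (orbit :: rest) =
        (orbitParentB rest).insert (orbit.getD 1 "") (orbit.getD 0 "") := by
      simp [orbitParentB, List.foldl_append]
    rw [hfold, PySem.Dict.get?_insert]
    by_cases hc : c = orbit.getD 1 ""
    · simp [orbitScanA, hc]
    · rw [if_neg hc, ih, orbitScanA]; simp only [List.getD] at hc ⊢; rw [if_neg hc]

-- with the same fuel, A's recursion equals counter + length of B's chain
theorem go_eq_chain (orbits : List (List String)) (fuel : Nat) :
    ∀ (obj : String) (counter : Int),
      orbit_counter_go orbits fuel obj counter =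
        counter + (orbitChainB (orbitParentB orbits) fuel obj).length := by
  induction fuel with
  | zero => intro obj counter; simp [orbit_counter_go, orbitChainB]
  | succ fuel ih =>
    intro obj counter
    simp only [orbit_counter_go, orbitChainB, orbitParentB_get?]
    by_cases h : obj = "COM"
    · simp [h]
    · simp only [h, ne_eq, not_false_iff, if_true, if_false]
      cases hscan : orbitScanA obj orbits with
      | none => simp
      | some orbit =>
        simp only [Option.map_some, List.length_cons, ih]
        push_cast
        ring

-- ===== VERDICT (by name: the statement is the Claim_ definition above) =====
theorem orbit_counter_spec : Claim_equal_orbit_counter := by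
  intro orbits obj counter _ _
  unfold Spec_orbit_counter orbit_counter orbit_counter_alt
  exact go_eq_chain orbits (orbits.length + 1) obj counter
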